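-- pv_equiv track=rewrite | github.com/BRM14642/Sybase | scr/automation/sybase.py | integrate_columns
-- ===== SOURCE A (Python) =====
-- def integrate_columns(original_columns, new_columns):
--     integrated_columns = []
--     isNumTransac = False
--     for column in original_columns:
--         if column['name'] == 'NumTransac':
--             isNumTransac = True
--             for new_column in new_columns:
--                 integrated_columns.append(new_column)
--         integrated_columns.append(column)
--
--     if not isNumTransac:
--         for column in new_columns:
--             integrated_columns.append(column)
--
--     return integrated_columns
-- ===== SOURCE B (Python) =====
-- def integrate_columns(original_columns, new_columns):
--     # Index-table decomposition: first record where the NumTransac columns sit,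
--     # then assemble the result from slices between those positions.
--     marks = [(i, column) for i, column in enumerate(original_columns)
--              if column['name'] == 'NumTransac']
--     if not marks:
--         return list(original_columns) + list(new_columns)
--     result = []
--     prev = 0
--     for i, column in marks:
--         result.extend(original_columns[prev:i])
--         result.extend(new_columns)
--         result.append(column)
--         prev = i + 1
--     result.extend(original_columns[prev:])
--     return result
-- ===== Notes on version B (the rewrite author's own statement) =====
-- stated objective: alternative
-- what changed: replaces A's flag-tracking single accumulator loop with a two-stage index-table decomposition: first collect the positions of the NumTransac columns, then assemble the result from the slices between consecutive positions, inserting new_columns at each recorded position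
import Mathlib
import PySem

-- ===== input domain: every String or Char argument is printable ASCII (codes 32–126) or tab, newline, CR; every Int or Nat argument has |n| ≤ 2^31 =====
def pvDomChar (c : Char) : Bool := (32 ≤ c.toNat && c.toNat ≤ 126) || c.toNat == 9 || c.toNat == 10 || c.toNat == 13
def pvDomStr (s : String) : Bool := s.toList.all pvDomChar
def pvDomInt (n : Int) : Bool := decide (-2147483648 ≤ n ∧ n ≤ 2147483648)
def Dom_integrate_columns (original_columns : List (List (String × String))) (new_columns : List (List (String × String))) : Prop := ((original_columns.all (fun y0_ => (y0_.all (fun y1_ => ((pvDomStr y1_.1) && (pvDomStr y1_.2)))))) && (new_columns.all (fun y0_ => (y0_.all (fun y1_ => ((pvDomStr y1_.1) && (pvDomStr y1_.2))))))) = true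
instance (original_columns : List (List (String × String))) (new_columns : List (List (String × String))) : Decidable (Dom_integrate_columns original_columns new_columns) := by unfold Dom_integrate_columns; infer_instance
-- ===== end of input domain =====

-- B replaces A's flag-tracking single pass with a two-stage index-table decomposition:
-- collect the positions of the NumTransac columns, then assemble the result from slices (alternative; no speed claim).

-- ===== PORT A =====
-- column['name']: first-match lookup in the association list (exact where the key exists; a missing key is a KeyError, excluded by Pre_)
def pyLookup (d : List (String × String)) (k : String) : Option String :=
  (d.find? (fun p => p.1 == k)).map (·.2)

def integrate_columns (original_columns : List (List (String × String))) (new_columns : List (List (String × String))) : List (List (String × String)) :=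
  let st := original_columns.foldl
    (fun (st : List (List (String × String)) × Bool) column =>
      if pyLookup column "name" = some "NumTransac" then
        ((new_columns.foldl (fun a newc => a ++ [newc]) st.1) ++ [column], true)
      else
        (st.1 ++ [column], st.2))
    ([], false)
  if st.2 = false then new_columns.foldl (fun a c => a ++ [c]) st.1 else st.1

-- ===== PORT B =====
-- marks = [(i, column) for i, column in enumerate(original_columns) if column['name'] == 'NumTransac']
-- (enumerate → List.zipIdx, index second; exact since Python's indices here are the nonnegative positions 0,1,…)
def pvMarks (original_columns : List (List (String × String))) : List ((List (String × String)) × Nat) :=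
  original_columns.zipIdx.filter (fun m => pyLookup m.1 "name" == some "NumTransac")

def integrate_columns_alt (original_columns : List (List (String × String))) (new_columns : List (List (String × String))) : List (List (String × String)) :=
  let marks := pvMarks original_columns
  if marks = [] then original_columns ++ new_columns
  else
    -- original_columns[prev:i] with 0 ≤ prev ≤ i ≤ len ported as (drop prev).take (i - prev), exact on that range
    let st := marks.foldl
      (fun (st : List (List (String × String)) × Nat) m =>
        (st.1 ++ (original_columns.drop st.2).take (m.2 - st.2) ++ new_columns ++ [m.1], m.2 + 1))
      ([], 0)
    st.1 ++ original_columns.drop st.2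

-- ===== PRECONDITION & SPEC =====
-- Pre_ excludes exactly the inputs where A raises KeyError: a column in original_columns without a 'name' key.
def Pre_integrate_columns (original_columns : List (List (String × String))) (new_columns : List (List (String × String))) : Prop :=
  ∀ column ∈ original_columns, (pyLookup column "name").isSome = true
instance (original_columns : List (List (String × String))) (new_columns : List (List (String × String))) : Decidable (Pre_integrate_columns original_columns new_columns) := by unfold Pre_integrate_columns; infer_instance

def pvWitness_integrate_columns : (List (List (String × String))) × (List (List (String × String))) :=
  ([[("name", "NumTransac")], [("name", "Amount")]], [[("name", "Extra")]])

def Spec_integrate_columns (original_columns : List (List (String × String))) (new_columns : List (List (String × String))) (out : List (List (String × String))) : Prop := out = integrate_columns_alt original_columns new_columns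
instance (original_columns : List (List (String × String))) (new_columns : List (List (String × String))) (out : List (List (String × String))) : Decidable (Spec_integrate_columns original_columns new_columns out) := by unfold Spec_integrate_columns; infer_instance

-- ===== CLAIM (what is proved, stated in full; the proofs are below) =====
def Claim_equal_integrate_columns : Prop := ∀ (original_columns : List (List (String × String))) (new_columns : List (List (String × String))), Dom_integrate_columns original_columns new_columns → Pre_integrate_columns original_columns new_columns → Spec_integrate_columns original_columns new_columns (integrate_columns original_columns new_columns)

-- ===== LEMMAS AND PROOFS =====

-- the per-column expansion both sides compute
def pvF (nc : List (List (String × String))) (c : List (String × String)) : List (List (String × String)) :=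
  if pyLookup c "name" = some "NumTransac" then nc ++ [c] else [c]

theorem flatten_map_singleton (l : List (List (String × String))) :
    (List.map (fun x => [x]) l).flatten = l := by
  induction l <;> simp [*]

theorem foldl_A (oc nc : List (List (String × String))) (acc : List (List (String × String))) (b : Bool) :
    oc.foldl
      (fun (st : List (List (String × String)) × Bool) column =>
        if pyLookup column "name" = some "NumTransac" then
          ((nc.foldl (fun a newc => a ++ [newc]) st.1) ++ [column], true)
        else
          (st.1 ++ [column], st.2))
      (acc, b)
    = (acc ++ oc.flatMap (pvF nc),
       b || oc.any (fun column => decide (pyLookup column "name" = some "NumTransac"))) := by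
  induction oc generalizing acc b with
  | nil => simp
  | cons h t ih =>
    by_cases hp : pyLookup h "name" = some "NumTransac"
    · simp only [List.foldl_cons, if_pos hp]
      rw [ih]
      simp [hp, pvF, flatten_map_singleton]
    · simp only [List.foldl_cons, if_neg hp]
      rw [ih]
      simp [hp, pvF]

theorem flatMap_id_of_no_match (oc nc : List (List (String × String)))
    (h : oc.any (fun column => decide (pyLookup column "name" = some "NumTransac")) = false) :
    oc.flatMap (pvF nc) = oc := by
  induction oc with
  | nil => simp
  | cons hd t ih =>
    simp only [List.any_cons, Bool.or_eq_false_iff, decide_eq_false_iff_not] at h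
    simp [pvF, h.1, ih h.2]

-- marks of the suffix starting at position k, indices absolute
def pvMarksFrom (rest : List (List (String × String))) (k : Nat) : List ((List (String × String)) × Nat) :=
  (rest.zipIdx k).filter (fun m => pyLookup m.1 "name" == some "NumTransac")

theorem pvMarksFrom_zero (oc : List (List (String × String))) : pvMarks oc = pvMarksFrom oc 0 := rfl

theorem pvMarksFrom_lb (rest : List (List (String × String))) (k : Nat) :
    ∀ m ∈ pvMarksFrom rest k, k ≤ m.2 := by
  intro m hm
  have := List.of_mem_filter hm
  have hz := List.mem_of_mem_filter hm
  rcases List.mem_zipIdx hz with ⟨h1, _⟩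
  omega

def pvStep (oc nc : List (List (String × String)))
    (st : List (List (String × String)) × Nat) (m : (List (String × String)) × Nat) :
    List (List (String × String)) × Nat :=
  (st.1 ++ (oc.drop st.2).take (m.2 - st.2) ++ nc ++ [m.1], m.2 + 1)

-- stepping past a non-recorded head: the first slice absorbs it
theorem pvFold_shift (idxs : List ((List (String × String)) × Nat)) (oc nc : List (List (String × String)))
    (c : List (String × String)) (acc : List (List (String × String))) (prev : Nat)
    (hd : oc.drop prev = c :: oc.drop (prev + 1))
    (hgt : ∀ m ∈ idxs, prev < m.2) :
    (idxs.foldl (pvStep oc nc) (acc, prev)).1 ++ oc.drop (idxs.foldl (pvStep oc nc) (acc, prev)).2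
    = (idxs.foldl (pvStep oc nc) (acc ++ [c], prev + 1)).1 ++ oc.drop (idxs.foldl (pvStep oc nc) (acc ++ [c], prev + 1)).2 := by
  cases idxs with
  | nil =>
    simp only [List.foldl_nil]
    rw [hd]
    simp
  | cons m rest =>
    have hm : prev < m.2 := hgt m (by simp)
    have htake : (oc.drop prev).take (m.2 - prev) = c :: (oc.drop (prev + 1)).take (m.2 - (prev + 1)) := by
      rw [hd]
      have : m.2 - prev = (m.2 - (prev + 1)) + 1 := by omega
      rw [this, List.take_succ_cons]
    simp only [List.foldl_cons, pvStep, htake]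
    have : acc ++ (c :: (oc.drop (prev + 1)).take (m.2 - (prev + 1))) ++ nc ++ [m.1]
         = (acc ++ [c]) ++ (oc.drop (prev + 1)).take (m.2 - (prev + 1)) ++ nc ++ [m.1] := by simp
    rw [this]

-- main invariant: walking the recorded positions of the suffix reproduces the flatMap expansion
theorem pvFold_main (rest : List (List (String × String))) (oc nc : List (List (String × String)))
    (prev : Nat) (acc : List (List (String × String)))
    (hd : oc.drop prev = rest) :
    (let st := (pvMarksFrom rest prev).foldl (pvStep oc nc) (acc, prev)
     st.1 ++ oc.drop st.2) = acc ++ rest.flatMap (pvF nc) := by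
  induction rest generalizing prev acc with
  | nil =>
    simp only [pvMarksFrom, List.zipIdx_nil, List.filter_nil, List.foldl_nil]
    rw [hd]
    simp
  | cons c t ih =>
    have hdrop : oc.drop (prev + 1) = t := by
      have h1 : oc.drop (prev + 1) = (oc.drop prev).drop 1 := by
        rw [List.drop_drop, Nat.add_comm]
      rw [h1, hd, List.drop_one, List.tail_cons]
    have hd' : oc.drop prev = c :: oc.drop (prev + 1) := by rw [hdrop]; exact hd
    by_cases hp : pyLookup c "name" = some "NumTransac"
    · have hmk : pvMarksFrom (c :: t) prev = (c, prev) :: pvMarksFrom t (prev + 1) := by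
        simp [pvMarksFrom, List.zipIdx_cons, hp]
      have htake : (oc.drop prev).take (prev - prev) = [] := by simp
      simp only [hmk, List.foldl_cons, pvStep, htake]
      have := ih (prev + 1) (acc ++ [] ++ nc ++ [c]) hdrop
      simp only [this]
      simp [pvF, hp]
    · have hmk : pvMarksFrom (c :: t) prev = pvMarksFrom t (prev + 1) := by
        simp [pvMarksFrom, List.zipIdx_cons, hp]
      have hgt : ∀ m ∈ pvMarksFrom t (prev + 1), prev < m.2 := by
        intro m hm
        have := pvMarksFrom_lb t (prev + 1) m hm
        omega
      simp only [hmk]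
      have hshift := pvFold_shift (pvMarksFrom t (prev + 1)) oc nc c acc prev hd' hgt
      simp only [hshift]
      have := ih (prev + 1) (acc ++ [c]) hdrop
      simp only [this]
      simp [pvF, hp]

theorem pvMarksFrom_nil_iff (rest : List (List (String × String))) (k : Nat) :
    pvMarksFrom rest k = [] ↔ rest.any (fun column => decide (pyLookup column "name" = some "NumTransac")) = false := by
  induction rest generalizing k with
  | nil => simp [pvMarksFrom]
  | cons c t ih =>
    by_cases hp : pyLookup c "name" = some "NumTransac"
    · simp [pvMarksFrom, List.zipIdx_cons, hp]
    · simpa [pvMarksFrom, List.zipIdx_cons, hp] using ih (k + 1)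

-- ===== VERDICT (by name: the statement is the Claim_ definition above) =====
theorem integrate_columns_spec : Claim_equal_integrate_columns := by
  intro oc nc _ _
  unfold Spec_integrate_columns integrate_columns integrate_columns_alt
  rw [foldl_A]
  simp only [Bool.false_or]
  have hmain := pvFold_main oc oc nc 0 [] (by simp)
  rw [pvMarksFrom_zero] at *
  by_cases hnil : pvMarksFrom oc 0 = []
  · have hany := (pvMarksFrom_nil_iff oc 0).mp hnil
    simp [hnil, hany, flatten_map_singleton, flatMap_id_of_no_match oc nc hany]
  · have hany : oc.any (fun column => decide (pyLookup column "name" = some "NumTransac")) = true := by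
      cases h : oc.any (fun column => decide (pyLookup column "name" = some "NumTransac"))
      · exact absurd ((pvMarksFrom_nil_iff oc 0).mpr h) hnil
      · rfl
    simp only [hany, if_neg hnil]
    have hfun : (fun (st : List (List (String × String)) × Nat) (m : (List (String × String)) × Nat) =>
        (st.1 ++ (oc.drop st.2).take (m.2 - st.2) ++ nc ++ [m.1], m.2 + 1)) = pvStep oc nc := by
      funext st m
      simp [pvStep]
    rw [hfun]
    simpa using hmain.symm
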